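-- pv_equiv track=rewrite | github.com/vlpl/skaro | src/skaro_core/phases/cicd.py | _split_workflows
-- ===== SOURCE A (Python) =====
-- def _split_workflows(config: str) -> dict[str, str]:
--     """Split LLM output into separate workflow files."""
--     workflows = {}
--     current_name = "ci.yml"
--     current_lines: list[str] = []
--
--     for line in config.splitlines():
--         # Detect workflow file markers
--         if line.startswith("# ") and (line.endswith(".yml") or line.endswith(".yaml")):
--             if current_lines:
--                 workflows[current_name] = "\n".join(current_lines)
--             current_name = line[2:].strip()
--             current_lines = []
--         else:
--             current_lines.append(line)
--
--     if current_lines: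
--         workflows[current_name] = "\n".join(current_lines)
--
--     return workflows
-- ===== SOURCE B (Python) =====
-- def _split_workflows(config: str) -> dict[str, str]:
--     """Split LLM output into separate workflow files."""
--
--     def _is_marker(line):
--         return line.startswith("# ") and (line.endswith(".yml") or line.endswith(".yaml"))
--
--     def _sections(name, lines):
--         # split at the FIRST marker and recurse on the remainder
--         for i, line in enumerate(lines):
--             if _is_marker(line):
--                 return [(name, lines[:i])] + _sections(line[2:].strip(), lines[i + 1:])
--         return [(name, lines)]
--
--     out = {}
--     for name, body in _sections("ci.yml", config.splitlines()):
--         if body: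
--             out[name] = "\n".join(body)
--     return out
-- ===== Notes on version B (the rewrite author's own statement) =====
-- stated objective: alternative
-- what changed: B replaces A's line-by-line state machine (carried current-name/current-lines, flushed inline into the dict) by a recursion on sections: it splits the line list at the FIRST marker, slices the body out, recurses on the remainder, and only then emits the resulting section list into a dict, dropping empty bodies.
import Mathlib
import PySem

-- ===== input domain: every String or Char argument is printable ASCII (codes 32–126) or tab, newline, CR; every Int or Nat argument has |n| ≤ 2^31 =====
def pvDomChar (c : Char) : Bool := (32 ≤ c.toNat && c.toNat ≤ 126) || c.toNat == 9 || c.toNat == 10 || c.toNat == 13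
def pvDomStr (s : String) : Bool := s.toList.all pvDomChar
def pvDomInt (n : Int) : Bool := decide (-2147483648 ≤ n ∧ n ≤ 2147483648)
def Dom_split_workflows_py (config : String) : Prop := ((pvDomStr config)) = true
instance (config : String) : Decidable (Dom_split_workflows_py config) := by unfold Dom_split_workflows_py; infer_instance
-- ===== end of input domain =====

-- B is a recursion on sections (split at the first marker, slice, recurse) instead of A's
-- line-by-line state machine with an inline flush; objective: alternative decomposition.

-- ===== PORT A =====
-- marker test: line.startswith("# ") and (line.endswith(".yml") or line.endswith(".yaml"))
def pvMarker (line : String) : Bool :=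
  PySem.Str.startswith line "# " &&
    (PySem.Str.endswith line ".yml" || PySem.Str.endswith line ".yaml")

-- line[2:].strip()
def pvName (line : String) : String :=
  PySem.Str.strip (PySem.Str.slice line (some 2) none)

-- one iteration of A's loop over (workflows, current_name, current_lines)
def pvAStep (st : PySem.Dict String String × String × List String) (line : String) :
    PySem.Dict String String × String × List String :=
  match st with
  | (d, n, cur) =>
    if pvMarker line then
      ((if cur = [] then d else d.insert n (PySem.Str.join "\n" cur)), pvName line, ([] : List String))
    else (d, n, cur ++ [line])

-- the final 'if current_lines: workflows[current_name] = ...'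
def pvFlush (st : PySem.Dict String String × String × List String) : PySem.Dict String String :=
  match st with
  | (d, n, cur) => if cur = [] then d else d.insert n (PySem.Str.join "\n" cur)

def split_workflows_py (config : String) : List (String × String) :=
  (pvFlush ((PySem.Str.splitlines config).foldl pvAStep (PySem.Dict.empty, "ci.yml", []))).items

-- ===== PORT B =====
-- Source B's inner for-loop over enumerate(lines): first index (and line) where the marker test holds
def pvFindMark : Nat → List String → Option (Nat × String)
  | _, [] => none
  | i, l :: r => if pvMarker l then some (i, l) else pvFindMark (i + 1) r

-- Source B's _sections: '[(name, lines[:i])] + _sections(line[2:].strip(), lines[i+1:])';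
-- since 0 ≤ i < len(lines), the slices lines[:i] and lines[i+1:] are exactly take i / drop (i+1)
def pvSections (name : String) (lines : List String) : List (String × List String) :=
  match h : pvFindMark 0 lines with
  | none => [(name, lines)]
  | some (i, l) => (name, lines.take i) :: pvSections (pvName l) (lines.drop (i + 1))
  termination_by lines.length
  decreasing_by
    have hpos : 0 < lines.length := by
      cases lines with
      | nil => simp [pvFindMark] at h
      | cons a t => simp
    simp only [List.length_drop]; omega

-- one step of Source B's emission loop 'if body: out[name] = "\n".join(body)'
def pvBStep (d : PySem.Dict String String) (p : String × List String) : PySem.Dict String String :=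
  if p.2 = [] then d else d.insert p.1 (PySem.Str.join "\n" p.2)

def split_workflows_py_alt (config : String) : List (String × String) :=
  ((pvSections "ci.yml" (PySem.Str.splitlines config)).foldl pvBStep PySem.Dict.empty).items

-- ===== PRECONDITION & SPEC =====
def Spec_split_workflows_py (config : String) (out : List (String × String)) : Prop := out = split_workflows_py_alt config
instance (config : String) (out : List (String × String)) : Decidable (Spec_split_workflows_py config out) := by unfold Spec_split_workflows_py; infer_instance

-- ===== CLAIM (what is proved, stated in full; the proofs are below) =====
def Claim_equal_split_workflows_py : Prop := ∀ (config : String), Dom_split_workflows_py config → Spec_split_workflows_py config (split_workflows_py config)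

-- ===== LEMMAS AND PROOFS =====

-- prepend lines to the body of the head section (proof-only helper)
def pvHP (c : List String) : List (String × List String) → List (String × List String)
  | [] => []
  | (m, b) :: t => (m, c ++ b) :: t

lemma pvHP_nil (xs : List (String × List String)) : pvHP [] xs = xs := by
  cases xs with
  | nil => rfl
  | cons p t => cases p; simp [pvHP]

lemma pvHP_hp (c : List String) (l : String) (xs : List (String × List String)) :
    pvHP c (pvHP [l] xs) = pvHP (c ++ [l]) xs := by
  cases xs with
  | nil => rfl
  | cons p t => cases p; simp [pvHP]

lemma pvFindMark_shift (ls : List String) : ∀ i : Nat,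
    pvFindMark i ls = (pvFindMark 0 ls).map (fun p => (p.1 + i, p.2)) := by
  induction ls with
  | nil => intro i; simp [pvFindMark]
  | cons l r ih =>
    intro i
    by_cases h : pvMarker l = true
    · simp [pvFindMark, h]
    · simp only [pvFindMark, h, Bool.false_eq_true, ite_false]
      rw [ih (i + 1), ih 1]
      cases hr : pvFindMark 0 r with
      | none => simp
      | some p => simp; omega

lemma pvSections_eq_none (n : String) (lines : List String)
    (h : pvFindMark 0 lines = none) : pvSections n lines = [(n, lines)] := by
  rw [pvSections]
  split
  · rfl
  · rename_i i l heq
    rw [show pvFindMark 0 lines = some (i, l) from heq] at h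
    exact absurd h (by simp)

lemma pvSections_eq_some (n : String) (lines : List String) (i : Nat) (l : String)
    (h : pvFindMark 0 lines = some (i, l)) :
    pvSections n lines = (n, lines.take i) :: pvSections (pvName l) (lines.drop (i + 1)) := by
  rw [pvSections]
  split
  · rename_i heq
    rw [show pvFindMark 0 lines = none from heq] at h
    exact absurd h (by simp)
  · rename_i i' l' heq
    rw [show pvFindMark 0 lines = some (i', l') from heq] at h
    obtain ⟨rfl, rfl⟩ : i' = i ∧ l' = l := by
      have := Option.some.inj h; exact ⟨congrArg Prod.fst this, congrArg Prod.snd this⟩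
    rfl

lemma pvSections_nil (n : String) : pvSections n [] = [(n, [])] :=
  pvSections_eq_none n [] (by simp [pvFindMark])

lemma pvSections_marker (n l : String) (rest : List String) (h : pvMarker l = true) :
    pvSections n (l :: rest) = (n, []) :: pvSections (pvName l) rest := by
  rw [pvSections_eq_some n (l :: rest) 0 l (by simp [pvFindMark, h])]
  simp

lemma pvSections_nonmarker (n l : String) (rest : List String) (h : pvMarker l = false) :
    pvSections n (l :: rest) = pvHP [l] (pvSections n rest) := by
  have hstep : pvFindMark 0 (l :: rest) = (pvFindMark 0 rest).map (fun p => (p.1 + 1, p.2)) := by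
    simp only [pvFindMark, h, Bool.false_eq_true, ite_false]
    exact pvFindMark_shift rest 1
  cases hr : pvFindMark 0 rest with
  | none =>
    rw [pvSections_eq_none n (l :: rest) (by rw [hstep, hr]; rfl),
        pvSections_eq_none n rest hr]
    rfl
  | some p =>
    obtain ⟨j, s⟩ := p
    rw [pvSections_eq_some n (l :: rest) (j + 1) s (by rw [hstep, hr]; rfl),
        pvSections_eq_some n rest j s hr]
    simp [pvHP]

-- main invariant: A's loop-plus-final-flush equals B's emission fold over B's section list
lemma pvMain (lines : List String) :
    ∀ (d : PySem.Dict String String) (n : String) (cur : List String),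
      pvFlush (lines.foldl pvAStep (d, n, cur))
        = (pvHP cur (pvSections n lines)).foldl pvBStep d := by
  induction lines with
  | nil =>
    intro d n cur
    simp [pvSections_nil, pvHP, pvFlush, pvBStep]
  | cons l rest ih =>
    intro d n cur
    by_cases h : pvMarker l = true
    · have hA : (l :: rest).foldl pvAStep (d, n, cur)
          = rest.foldl pvAStep (pvBStep d (n, cur), pvName l, []) := by
        simp [List.foldl_cons, pvAStep, pvBStep, h]
      rw [hA, ih (pvBStep d (n, cur)) (pvName l) [], pvSections_marker n l rest h, pvHP_nil]
      simp [pvHP]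
    · have h' : pvMarker l = false := by simpa using h
      have hA : (l :: rest).foldl pvAStep (d, n, cur)
          = rest.foldl pvAStep (d, n, cur ++ [l]) := by
        simp [List.foldl_cons, pvAStep, h]
      rw [hA, ih d n (cur ++ [l]), pvSections_nonmarker n l rest h', pvHP_hp]

-- ===== VERDICT (by name: the statement is the Claim_ definition above) =====
theorem split_workflows_py_spec : Claim_equal_split_workflows_py := by
  intro config _
  unfold Spec_split_workflows_py split_workflows_py split_workflows_py_alt
  rw [pvMain (PySem.Str.splitlines config) PySem.Dict.empty "ci.yml" [], pvHP_nil]
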